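-- pv_equiv track=rewrite | github.com/Hiskyline/monarch-api | app.py | frequency_model
-- ===== SOURCE A (Python) =====
-- GRID_SIZE = 25
--
-- SAFE_TILES = 5
--
-- def frequency_model(games):
--
--     counts = [0] * GRID_SIZE
--
--     for game in games:
--
--         mines = game.get("mines", [])
--
--         for m in mines:
--
--             if 0 <= m < GRID_SIZE:
--                 counts[m] += 1
--
--     indexed = list(enumerate(counts))
--
--     safest = sorted(indexed, key=lambda x: x[1])[:SAFE_TILES]
--
--     return [x[0] for x in safest]
-- ===== SOURCE B (Python) =====
-- GRID_SIZE = 25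
--
-- SAFE_TILES = 5
--
--
-- def frequency_model(games):
--     # flatten all mine lists once, then tally each tile by counting its
--     # occurrences in the flat stream (out-of-range entries never match a tile)
--     mines = [m for game in games for m in game.get("mines", [])]
--     counts = [mines.count(i) for i in range(GRID_SIZE)]
--     # bucket selection instead of a comparison sort: group tile indices by
--     # count value (ascending index order inside each bucket), concatenate the
--     # buckets by increasing count value, keep the first SAFE_TILES indices
--     buckets = {}
--     for idx, c in enumerate(counts):
--         buckets.setdefault(c, []).append(idx)
--     result = []
--     for v in range(max(counts) + 1):
--         result += buckets.get(v, [])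
--     return result[:SAFE_TILES]
-- ===== Notes on version B (the rewrite author's own statement) =====
-- stated objective: alternative
-- what changed: B replaces both phases: the in-place counts[m] += 1 tally becomes a flatten-then-count pass (counts[i] = occurrences of i in the flattened mine stream), and the sort-and-slice selection sorted(enumerate(counts), key=count)[:5] becomes a counting/bucket pass concatenating index buckets by increasing count value, reproducing the stable sort order without comparison sorting.
import Mathlib
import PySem

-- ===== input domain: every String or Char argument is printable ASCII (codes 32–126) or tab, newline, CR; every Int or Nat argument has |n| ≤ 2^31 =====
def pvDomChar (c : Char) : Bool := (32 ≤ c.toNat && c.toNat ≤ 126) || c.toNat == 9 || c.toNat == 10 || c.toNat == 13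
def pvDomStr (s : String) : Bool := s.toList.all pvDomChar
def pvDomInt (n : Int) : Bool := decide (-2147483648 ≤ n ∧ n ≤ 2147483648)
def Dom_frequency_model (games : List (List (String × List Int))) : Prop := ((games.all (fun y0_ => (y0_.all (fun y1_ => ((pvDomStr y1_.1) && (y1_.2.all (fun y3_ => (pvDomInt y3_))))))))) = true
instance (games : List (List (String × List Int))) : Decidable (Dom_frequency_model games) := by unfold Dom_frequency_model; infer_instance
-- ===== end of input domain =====

-- B tallies by flatten-then-count and selects by a counting/bucket pass over count values instead of A's in-place tally and sort-and-slice (same return value; objective: alternative).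


-- ===== PORT A =====
def frequency_model (games : List (List (String × List Int))) : List Int :=
  let counts0 : List Int := PySem.List.pyRepeat [0] 25
  let counts := games.foldl (fun counts game =>
      let mines := (((game.find? (fun kv => kv.1 == "mines")).map (·.2)).getD [])
      mines.foldl (fun counts m =>
        if 0 ≤ m ∧ m < 25 then
          PySem.List.pySetD counts m (PySem.List.pyGetD counts m 0 + 1)
        else counts) counts) counts0
  let indexed := PySem.List.enumerate counts 0
  let safest := PySem.List.slice (PySem.List.sorted indexed (fun x => x.2)) none (some 5)
  safest.map (·.1)

-- ===== PORT B =====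
def frequency_model_alt (games : List (List (String × List Int))) : List Int :=
  let mines := games.flatMap (fun game => (((game.find? (fun kv => kv.1 == "mines")).map (·.2)).getD []))
  let counts : List Int := (PySem.List.pyRange 0 25 1).map (fun i => (PySem.List.count mines i : Int))
  let buckets := (PySem.List.enumerate counts 0).foldl
      (fun d p => d.modify p.2 [] (fun l => l ++ [p.1])) PySem.Dict.empty
  -- max(counts): counts always has 25 entries, so max? is some; .getD 0 only names that value
  let maxc := (PySem.List.max? counts (fun c => c)).getD 0
  let result := (PySem.List.pyRange 0 (maxc + 1) 1).foldl
      (fun acc v => acc ++ buckets.getD v []) []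
  PySem.List.slice result none (some 5)

-- ===== PRECONDITION & SPEC =====
def Spec_frequency_model (games : List (List (String × List Int))) (out : List Int) : Prop := out = frequency_model_alt games
instance (games : List (List (String × List Int))) (out : List Int) : Decidable (Spec_frequency_model games out) := by unfold Spec_frequency_model; infer_instance

-- ===== CLAIM (what is proved, stated in full; the proofs are below) =====
def Claim_equal_frequency_model : Prop := ∀ (games : List (List (String × List Int))), Dom_frequency_model games → Spec_frequency_model games (frequency_model games)

-- ===== LEMMAS AND PROOFS =====

-- A's inner tally step, named for the lemmas below (definitionally A's lambda)
def pvStep (counts : List Int) (m : Int) : List Int :=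
  if 0 ≤ m ∧ m < 25 then
    PySem.List.pySetD counts m (PySem.List.pyGetD counts m 0 + 1)
  else counts

theorem pvStep_length (cs : List Int) (m : Int) : (pvStep cs m).length = cs.length := by
  unfold pvStep
  split_ifs with hm
  · rw [PySem.List.length_pySetD]
  · rfl

theorem pvStep_getD (cs : List Int) (m : Int) (h : cs.length = 25) (k : Nat) (hk : k < 25) :
    (pvStep cs m).getD k 0 = cs.getD k 0 + (if m = (k : Int) then 1 else 0) := by
  unfold pvStep
  by_cases hm : 0 ≤ m ∧ m < 25
  · rw [if_pos hm, PySem.List.pySetD_of_nonneg cs _ hm.1]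
    by_cases hmk : m = (k : Int)
    · -- in range, m = k
      have hmn : m.toNat = k := by omega
      have hlt : k < cs.length := by omega
      rw [if_pos hmk, hmn, List.getD_eq_getElem _ _ (by rw [List.length_set]; omega),
          List.getElem_set_self, List.getD_eq_getElem _ _ hlt,
          PySem.List.pyGetD_eq_getElem cs 0 hm.1 (by omega)]
      simp [hmn]
    · -- in range, m ≠ k
      have hne : m.toNat ≠ k := by omega
      rw [if_neg hmk, List.getD_eq_getElem _ _ (by rw [List.length_set]; omega),
          List.getElem_set_ne hne, List.getD_eq_getElem _ _ (by omega)]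
      omega
  · -- out of range: m ≠ k since 0 ≤ k < 25
    have hmk : ¬ (m = (k : Int)) := by omega
    rw [if_neg hm, if_neg hmk]
    omega

theorem pv_tally (ms : List Int) : ∀ cs : List Int, cs.length = 25 →
    (ms.foldl pvStep cs).length = 25 ∧
    ∀ k : Nat, k < 25 → (ms.foldl pvStep cs).getD k 0 = cs.getD k 0 + (List.count ((k : Int)) ms : Int) := by
  induction ms with
  | nil => intro cs h; exact ⟨h, fun k hk => by simp⟩
  | cons m ms ih =>
    intro cs h
    rw [List.foldl_cons]
    have h' : (pvStep cs m).length = 25 := by rw [pvStep_length]; exact h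
    rcases ih (pvStep cs m) h' with ⟨hl, hg⟩
    refine ⟨hl, fun k hk => ?_⟩
    rw [hg k hk, pvStep_getD cs m h k hk, List.count_cons]
    by_cases hmk : m = (k : Int)
    · simp [hmk]; ring
    · simp [hmk]

-- the strict "stable order" relation: by key (second component), ties by original position (first component)
def pvLex (a b : Int × Int) : Prop := a.2 < b.2 ∨ (a.2 = b.2 ∧ a.1 < b.1)

theorem pv_insertBy_nil (b : Int × Int → Int × Int → Bool) (x : Int × Int) :
    PySem.List.insertBy b x [] = [x] := rfl

theorem pv_insertBy_cons (b : Int × Int → Int × Int → Bool) (x y : Int × Int) (ys : List (Int × Int)) :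
    PySem.List.insertBy b x (y :: ys) = if b x y then x :: y :: ys else y :: PySem.List.insertBy b x ys := rfl

theorem pv_insertBy_pairwise (x : Int × Int) (acc : List (Int × Int))
    (h1 : acc.Pairwise pvLex) (h2 : ∀ y ∈ acc, y.1 < x.1) :
    (PySem.List.insertBy (fun a b => decide (a.2 < b.2)) x acc).Pairwise pvLex := by
  induction acc with
  | nil => simp [pv_insertBy_nil, List.pairwise_cons]
  | cons y ys ih =>
    rw [pv_insertBy_cons]
    rcases List.pairwise_cons.mp h1 with ⟨hy, hys⟩
    by_cases hxy : x.2 < y.2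
    · simp only [hxy, decide_true, if_pos]
      refine List.pairwise_cons.mpr ⟨?_, h1⟩
      intro z hz
      rcases List.mem_cons.mp hz with hz | hz
      · subst hz; exact Or.inl hxy
      · have hyz : y.2 ≤ z.2 := by rcases hy z hz with h | ⟨h, _⟩ <;> omega
        exact Or.inl (by omega)
    · simp only [hxy, decide_false, Bool.false_eq_true, if_neg, not_false_iff]
      refine List.pairwise_cons.mpr ⟨?_, ih hys (fun z hz => h2 z (List.mem_cons_of_mem y hz))⟩
      intro z hz
      rcases (PySem.List.mem_insertBy _ x z ys).mp hz with hz | hz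
      · subst hz
        rcases lt_or_eq_of_le (not_lt.mp hxy) with h | h
        · exact Or.inl h
        · exact Or.inr ⟨h, h2 y List.mem_cons_self⟩
      · exact hy z hz

theorem pv_sorted_pairwise_lex (xs : List (Int × Int))
    (hx : xs.Pairwise (fun a b => a.1 < b.1)) :
    (PySem.List.sorted xs (fun p => p.2)).Pairwise pvLex := by
  rw [PySem.List.sorted_eq_foldl_insertBy]
  suffices h : ∀ (l : List (Int × Int)) (acc : List (Int × Int)),
      acc.Pairwise pvLex → (∀ y ∈ acc, ∀ z ∈ l, y.1 < z.1) →
      l.Pairwise (fun a b => a.1 < b.1) →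
      (l.foldl (fun acc x => PySem.List.insertBy (fun a b => decide (a.2 < b.2)) x acc) acc).Pairwise pvLex by
    exact h xs [] List.Pairwise.nil (by simp) hx
  intro l
  induction l with
  | nil => intro acc h1 _ _; exact h1
  | cons x l ih =>
    intro acc h1 h2 h3
    rcases List.pairwise_cons.mp h3 with ⟨hxl, hl⟩
    apply ih
    · exact pv_insertBy_pairwise x acc h1 (fun y hy => h2 y hy x List.mem_cons_self)
    · intro y hy z hz
      rcases (PySem.List.mem_insertBy _ x y acc).mp hy with hy | hy
      · subst hy; exact hxl z hz
      · exact h2 y hy z (List.mem_cons_of_mem x hz)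
    · exact hl

theorem pv_flat_filter_perm (vs : List Int) (hn : vs.Nodup) :
    ∀ (E : List (Int × Int)), (∀ p ∈ E, p.2 ∈ vs) →
    (vs.flatMap (fun v => E.filter (fun p => p.2 == v))).Perm E := by
  induction vs with
  | nil =>
    intro E hall
    have hE : E = [] := by
      cases E with
      | nil => rfl
      | cons p E => exact absurd (hall p List.mem_cons_self) (List.not_mem_nil)
    simp [hE]
  | cons v vs ih =>
    rcases List.nodup_cons.mp hn with ⟨hv, hn'⟩
    intro E hall
    rw [List.flatMap_cons]
    have hrw : vs.map (fun w => E.filter (fun p => p.2 == w))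
        = vs.map (fun w => (E.filter (fun p => !(p.2 == v))).filter (fun p => p.2 == w)) := by
      apply List.map_congr_left
      intro w hw
      rw [List.filter_filter]
      apply List.filter_congr
      intro p _
      by_cases h : p.2 = w
      · have hwv : ¬ (w = v) := fun he => hv (he ▸ hw)
        simp [h, hwv]
      · simp [h]
    have hperm : (vs.flatMap (fun w => (E.filter (fun p => !(p.2 == v))).filter (fun p => p.2 == w))).Perm
        (E.filter (fun p => !(p.2 == v))) := by
      apply ih hn'
      intro p hp
      rcases List.mem_filter.mp hp with ⟨hpE, hpv⟩
      rcases List.mem_cons.mp (hall p hpE) with h | h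
      · simp at hpv; exact absurd h hpv
      · exact h
    refine List.Perm.trans ?_ (List.filter_append_perm (fun p => p.2 == v) E)
    apply List.Perm.append_left
    rw [List.flatMap_def, hrw, ← List.flatMap_def]
    exact hperm

theorem pv_getD_bucket (l : List (Int × Int)) :
    ∀ (d : PySem.Dict Int (List Int)) (v : Int),
    (l.foldl (fun d p => d.modify p.2 [] (fun xs => xs ++ [p.1])) d).getD v []
      = d.getD v [] ++ (l.filter (fun p => p.2 == v)).map (·.1) := by
  induction l with
  | nil => intro d v; simp
  | cons p l ih =>
    intro d v
    rw [List.foldl_cons, ih, List.filter_cons]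
    by_cases h : p.2 = v
    · simp only [h, beq_self_eq_true, if_pos, List.map_cons]
      rw [PySem.Dict.getD_modify]
      simp
    · have hb : (p.2 == v) = false := by simp [h]
      simp only [hb, Bool.false_eq_true, if_neg, not_false_iff]
      rw [PySem.Dict.getD_modify, if_neg (fun hh => h hh.symm)]

theorem pvLex_le (a b : Int × Int) (h : pvLex a b) :
    (toLex (a.2, a.1) : Lex (Int × Int)) ≤ toLex (b.2, b.1) := by
  rw [Prod.Lex.toLex_le_toLex]
  rcases h with h | ⟨h1, h2⟩
  · exact Or.inl h
  · exact Or.inr ⟨h1, le_of_lt h2⟩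

theorem pv_flat_pairwise (E : List (Int × Int)) (vs : List Int)
    (hE : E.Pairwise (fun a b => a.1 < b.1))
    (hvs : vs.Pairwise (· < ·)) :
    (vs.flatMap (fun v => E.filter (fun p => p.2 == v))).Pairwise pvLex := by
  rw [List.flatMap_def]
  rw [List.pairwise_flatten]
  constructor
  · intro l hl
    rcases List.mem_map.mp hl with ⟨w, _, rfl⟩
    apply (hE.filter _).imp_of_mem
    intro a b ha hb hab
    have ha2 : a.2 = w := by have := (List.mem_filter.mp ha).2; simpa using this
    have hb2 : b.2 = w := by have := (List.mem_filter.mp hb).2; simpa using this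
    exact Or.inr ⟨by rw [ha2, hb2], hab⟩
  · rw [List.pairwise_map]
    apply hvs.imp_of_mem
    intro v w _ _ hvw x hx y hy
    have hx2 : x.2 = v := by have := (List.mem_filter.mp hx).2; simpa using this
    have hy2 : y.2 = w := by have := (List.mem_filter.mp hy).2; simpa using this
    exact Or.inl (by omega)

theorem pv_sorted_eq_flat (E : List (Int × Int)) (vs : List Int)
    (hE : E.Pairwise (fun a b => a.1 < b.1))
    (hvs : vs.Pairwise (· < ·))
    (hall : ∀ p ∈ E, p.2 ∈ vs) :
    PySem.List.sorted E (fun p => p.2)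
      = vs.flatMap (fun v => E.filter (fun p => p.2 == v)) := by
  apply PySem.List.eq_of_perm_of_pairwise_le_of_injective
      (key := fun p : Int × Int => (toLex (p.2, p.1) : Lex (Int × Int)))
  · intro a b h
    have hp : ((a.2, a.1) : Int × Int) = (b.2, b.1) := congrArg (fun x : Lex (Int × Int) => ofLex x) h
    have h1 := congrArg Prod.fst hp
    have h2 := congrArg Prod.snd hp
    simp only at h1 h2
    exact Prod.ext h2 h1
  · exact (PySem.List.sorted_perm E _ false).trans
      (pv_flat_filter_perm vs (hvs.nodup) E hall).symm
  · exact (pv_sorted_pairwise_lex E hE).imp_of_mem (fun {a b} _ _ h => pvLex_le a b h)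
  · exact (pv_flat_pairwise E vs hE hvs).imp_of_mem (fun {a b} _ _ h => pvLex_le a b h)

-- A's whole tally (fold over games of inner folds) equals B's flatten-then-count list
theorem pv_tally_eq_counts (games : List (List (String × List Int))) :
    games.foldl (fun counts game =>
      let mines := (((game.find? (fun kv => kv.1 == "mines")).map (·.2)).getD [])
      mines.foldl (fun counts m =>
        if 0 ≤ m ∧ m < 25 then
          PySem.List.pySetD counts m (PySem.List.pyGetD counts m 0 + 1)
        else counts) counts) ((PySem.List.pyRepeat [0] 25 : List Int))
    = (PySem.List.pyRange 0 25 1).map (fun i =>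
        (PySem.List.count (games.flatMap (fun game => (((game.find? (fun kv => kv.1 == "mines")).map (·.2)).getD []))) i : Int)) := by
  have hflat : games.foldl (fun counts game =>
      let mines := (((game.find? (fun kv => kv.1 == "mines")).map (·.2)).getD [])
      mines.foldl pvStep counts) ((PySem.List.pyRepeat [0] 25 : List Int))
      = (games.flatMap (fun game => (((game.find? (fun kv => kv.1 == "mines")).map (·.2)).getD []))).foldl
          pvStep ((PySem.List.pyRepeat [0] 25 : List Int)) := by
    rw [List.foldl_flatMap]
  have hstep : (fun (counts : List Int) (game : List (String × List Int)) =>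
      let mines := (((game.find? (fun kv => kv.1 == "mines")).map (·.2)).getD [])
      mines.foldl (fun counts m =>
        if 0 ≤ m ∧ m < 25 then
          PySem.List.pySetD counts m (PySem.List.pyGetD counts m 0 + 1)
        else counts) counts)
      = (fun counts game =>
      let mines := (((game.find? (fun kv => kv.1 == "mines")).map (·.2)).getD [])
      mines.foldl pvStep counts) := rfl
  rw [hstep, hflat]
  set ms := games.flatMap (fun game => (((game.find? (fun kv => kv.1 == "mines")).map (·.2)).getD [])) with hms
  have h0 : ((PySem.List.pyRepeat [0] 25 : List Int)).length = 25 := by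
    rw [PySem.List.pyRepeat_singleton]; rfl
  rcases pv_tally ms _ h0 with ⟨hl, hg⟩
  have hr : PySem.List.pyRange 0 25 1 = (List.range 25).map (fun k : Nat => (k : Int)) := by
    exact_mod_cast PySem.List.pyRange_zero_natCast 25
  rw [hr, List.map_map]
  apply List.ext_getElem
  · rw [hl, List.length_map, List.length_range]
  · intro k hk1 hk2
    have hk : k < 25 := by rw [hl] at hk1; exact hk1
    have := hg k hk
    rw [List.getD_eq_getElem _ _ hk1] at this
    rw [this]
    rw [PySem.List.pyRepeat_singleton, List.getD_eq_getElem _ _ (by simpa using hk),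
        List.getElem_replicate]
    simp [PySem.List.count_eq]

-- ===== VERDICT (by name: the statement is the Claim_ definition above) =====
theorem frequency_model_spec : Claim_equal_frequency_model := by
  intro games _
  show frequency_model games = frequency_model_alt games
  simp only [frequency_model, frequency_model_alt]
  rw [pv_tally_eq_counts games]
  set ms := games.flatMap (fun game => (((game.find? (fun kv => kv.1 == "mines")).map (·.2)).getD [])) with hms
  set counts : List Int := (PySem.List.pyRange 0 25 1).map (fun i => (PySem.List.count ms i : Int)) with hcounts
  have hclen : counts.length = 25 := by
    rw [hcounts, List.length_map]; rfl
  have hnn : ∀ c ∈ counts, (0:Int) ≤ c := by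
    intro c hc
    rcases List.mem_map.mp hc with ⟨i, _, rfl⟩
    exact Int.natCast_nonneg _
  have hcne : counts ≠ [] := by
    intro h; rw [h] at hclen; exact absurd hclen (by decide)
  obtain ⟨m, hm⟩ : ∃ m, PySem.List.max? counts (fun c => c) = some m := by
    rcases h : PySem.List.max? counts (fun c => c) with _ | m
    · exact absurd ((PySem.List.max?_eq_none_iff counts (fun c => c)).mp h) hcne
    · exact ⟨m, rfl⟩
  set E := PySem.List.enumerate counts 0 with hE
  set maxc := (PySem.List.max? counts (fun c => c)).getD 0 with hmaxc
  have hmaxv : maxc = m := by rw [hmaxc, hm]; rfl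
  have hub : ∀ p ∈ E, 0 ≤ p.2 ∧ p.2 ≤ maxc := by
    intro p hp
    rcases (PySem.List.mem_enumerate_iff counts 0 p).mp hp with ⟨k, hk, rfl⟩
    have hmem : counts[k] ∈ counts := List.getElem_mem hk
    refine ⟨hnn _ hmem, ?_⟩
    rw [hmaxv]
    exact PySem.List.max?_isMax hm _ hmem
  have hall : ∀ p ∈ E, p.2 ∈ PySem.List.pyRange 0 (maxc + 1) 1 := by
    intro p hp
    have := hub p hp
    exact PySem.List.mem_pyRange_one.mpr ⟨this.1, by omega⟩
  have hEpw : E.Pairwise (fun a b => a.1 < b.1) := PySem.List.pairwise_lt_enumerate counts 0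
  have hvpw : (PySem.List.pyRange 0 (maxc + 1) 1).Pairwise (· < ·) :=
    PySem.List.pairwise_lt_pyRange_one 0 (maxc + 1)
  -- B's bucket collection equals the flatMap of filters
  have hbucket : ∀ v : Int,
      (E.foldl (fun d p => d.modify p.2 [] (fun l => l ++ [p.1])) PySem.Dict.empty).getD v []
        = (E.filter (fun p => p.2 == v)).map (·.1) := by
    intro v
    rw [pv_getD_bucket E PySem.Dict.empty v, PySem.Dict.getD_empty]
    rfl
  have hres : (PySem.List.pyRange 0 (maxc + 1) 1).foldl
      (fun acc v => acc ++ (E.foldl (fun d p => d.modify p.2 [] (fun l => l ++ [p.1])) PySem.Dict.empty).getD v []) []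
      = ((PySem.List.pyRange 0 (maxc + 1) 1).flatMap (fun v => E.filter (fun p => p.2 == v))).map (·.1) := by
    have h1 : (fun acc v => acc ++ (E.foldl (fun d p => d.modify p.2 [] (fun l => l ++ [p.1])) PySem.Dict.empty).getD v [])
        = fun (acc : List Int) v => acc ++ (E.filter (fun p => p.2 == v)).map (·.1) := by
      funext acc v; rw [hbucket v]
    rw [h1, PySem.List.foldl_append_eq_flatMap, List.map_flatMap]
    rfl
  have hsorted : PySem.List.sorted E (fun x => x.2)
      = (PySem.List.pyRange 0 (maxc + 1) 1).flatMap (fun v => E.filter (fun p => p.2 == v)) :=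
    pv_sorted_eq_flat E _ hEpw hvpw hall
  rw [hres, hsorted, PySem.List.slice_to _ (by norm_num : (0:Int) ≤ 5),
      PySem.List.slice_to _ (by norm_num : (0:Int) ≤ 5), List.map_take]
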